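-- pv_equiv track=rewrite | github.com/ZhuofanShen/Rosetta-Enzyme-Design-Pipeline | scripts-design/generate_scores_table.py | read_annotated_sequence
-- ===== SOURCE A (Python) =====
-- def read_annotated_sequence(annotated_sequence, symmetric):
--     sequence = str()
--     annotation_dict = dict() # key of the dict is sequence string index
--     is_annotation = False
--     index_diff = 0
--     n_term = 0
--     for index in range(len(annotated_sequence)):
--         if is_annotation:
--             index_diff += 1
--             if annotated_sequence[index] == ']':
--                 if symmetric and ':NtermProteinFull' in annotated_sequence[begin_index + 1:index]:
--                     n_term += 1
--                     if n_term == 2: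
--                         break
--                 annotation_dict.update({str(index - index_diff): annotated_sequence[begin_index + 1:index]})
--                 is_annotation = False
--         else:
--             if annotated_sequence[index] == '[':
--                 begin_index = index
--                 index_diff += 1
--                 is_annotation = True
--             else:
--                 sequence += annotated_sequence[index]
--     return sequence[:-1], annotation_dict
-- ===== SOURCE B (Python) =====
-- def read_annotated_sequence(annotated_sequence, symmetric):
--     annotation_dict = {}
--     seq_chunks = []
--     seq_len = 0
--     n_term = 0
--     rest = annotated_sequence
--     while True:
--         chunk, sep, rest = rest.partition('[')
--         seq_chunks.append(chunk)
--         seq_len += len(chunk)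
--         if not sep:
--             break
--         inner, sep, rest = rest.partition(']')
--         if not sep:
--             break
--         if symmetric and ':NtermProteinFull' in inner:
--             n_term += 1
--             if n_term == 2:
--                 break
--         annotation_dict[str(seq_len - 1)] = inner
--     sequence = ''.join(seq_chunks)
--     return sequence[:-1], annotation_dict
-- ===== Notes on version B (the rewrite author's own statement) =====
-- stated objective: faster
-- what changed: Replaces A's char-by-char state machine (is_annotation flag, index_diff bookkeeping, per-char string concatenation) with a chunk-wise str.partition loop that splits off whole bracket groups, records each annotation at str(len(sequence_so_far)-1), and joins the chunks once.
import Mathlib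
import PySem

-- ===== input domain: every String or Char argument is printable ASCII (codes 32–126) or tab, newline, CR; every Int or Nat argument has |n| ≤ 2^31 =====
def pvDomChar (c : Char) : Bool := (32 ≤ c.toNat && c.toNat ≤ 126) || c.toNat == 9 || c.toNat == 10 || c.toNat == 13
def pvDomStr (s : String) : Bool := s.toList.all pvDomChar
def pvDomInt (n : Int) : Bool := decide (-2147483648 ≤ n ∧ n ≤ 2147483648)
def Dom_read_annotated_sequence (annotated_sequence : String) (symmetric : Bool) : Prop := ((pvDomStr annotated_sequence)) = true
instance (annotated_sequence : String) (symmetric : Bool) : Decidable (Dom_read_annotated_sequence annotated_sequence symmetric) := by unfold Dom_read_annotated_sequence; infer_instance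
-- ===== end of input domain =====

-- B re-implements the char-by-char state machine as a chunk-wise str.partition loop (idiomatic decomposition; same return value).

-- ===== PORT A =====
-- A's for-loop over range(len(s)) with break: structural recursion over the remaining
-- characters, tracking the absolute index; slices of the full string via PySem.List.slice.
def pvALoop (s : List Char) (rest : List Char) (idx : Nat) (seq : List Char)
    (dict : PySem.Dict String String) (isAnn : Bool) (idiff : Int) (bidx : Nat)
    (nterm : Int) (symmetric : Bool) : List Char × PySem.Dict String String :=
  match rest with
  | [] => (seq, dict)
  | c :: rest' =>
    if isAnn then
      -- index_diff += 1
      if c = ']' then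
        if symmetric && PySem.Chars.isIn ":NtermProteinFull".toList
            (PySem.List.slice s (some ((bidx : Int) + 1)) (some (idx : Int))) then
          if nterm + 1 == 2 then (seq, dict)   -- break
          else
            pvALoop s rest' (idx + 1) seq
              (dict.insert (PySem.Int.toStr ((idx : Int) - (idiff + 1)))
                (String.ofList (PySem.List.slice s (some ((bidx : Int) + 1)) (some (idx : Int)))))
              false (idiff + 1) bidx (nterm + 1) symmetric
        else
          pvALoop s rest' (idx + 1) seq
            (dict.insert (PySem.Int.toStr ((idx : Int) - (idiff + 1)))
              (String.ofList (PySem.List.slice s (some ((bidx : Int) + 1)) (some (idx : Int)))))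
            false (idiff + 1) bidx nterm symmetric
      else
        pvALoop s rest' (idx + 1) seq dict true (idiff + 1) bidx nterm symmetric
    else
      if c = '[' then
        pvALoop s rest' (idx + 1) seq dict true (idiff + 1) idx nterm symmetric
      else
        pvALoop s rest' (idx + 1) (seq ++ [c]) dict false idiff bidx nterm symmetric

def read_annotated_sequence (annotated_sequence : String) (symmetric : Bool) : String × (List (String × String)) :=
  let cs := annotated_sequence.toList
  let r := pvALoop cs cs 0 [] PySem.Dict.empty false 0 0 0 symmetric
  (String.ofList r.1.dropLast, r.2.items)   -- sequence[:-1] = dropLast (PySem.List.slice_to_neg_one)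

-- ===== PORT B =====
-- str.partition(c) for a one-character separator: (before first c, found?, after).
def pvPartition (c : Char) : List Char → List Char × Option (List Char)
  | [] => ([], none)
  | x :: xs =>
    if x = c then ([], some xs)
    else
      let p := pvPartition c xs
      (x :: p.1, p.2)

-- needed by pvBLoop's decreasing_by
theorem pvPartition_some_length (c : Char) (l pre post : List Char)
    (h : pvPartition c l = (pre, some post)) : post.length < l.length := by
  induction l generalizing pre with
  | nil => simp [pvPartition] at h
  | cons x xs ih =>
    by_cases hx : x = c
    · simp only [pvPartition, if_pos hx, Prod.mk.injEq, Option.some.injEq] at h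
      simp [← h.2]
    · rcases hp : pvPartition c xs with ⟨p1, p2⟩
      simp only [pvPartition, if_neg hx, hp, Prod.mk.injEq] at h
      cases p2 with
      | none => simp at h
      | some q =>
        obtain ⟨-, hpost⟩ := h
        simp only [Option.some.injEq] at hpost
        subst hpost
        exact Nat.lt_trans (ih p1 hp) (by simp)

def pvBLoop (rest : List Char) (seqLen : Int) (chunks : List Char)
    (dict : PySem.Dict String String) (nterm : Int) (symmetric : Bool) :
    List Char × PySem.Dict String String :=
  match h1 : pvPartition '[' rest with
  | (chunk, none) => (chunks ++ chunk, dict)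
  | (chunk, some rest2) =>
    match h2 : pvPartition ']' rest2 with
    | (_, none) => (chunks ++ chunk, dict)
    | (inner, some rest3) =>
      if symmetric && PySem.Chars.isIn ":NtermProteinFull".toList inner then
        if nterm + 1 == 2 then (chunks ++ chunk, dict)
        else
          pvBLoop rest3 (seqLen + chunk.length) (chunks ++ chunk)
            (dict.insert (PySem.Int.toStr (seqLen + chunk.length - 1)) (String.ofList inner))
            (nterm + 1) symmetric
      else
        pvBLoop rest3 (seqLen + chunk.length) (chunks ++ chunk)
          (dict.insert (PySem.Int.toStr (seqLen + chunk.length - 1)) (String.ofList inner))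
          nterm symmetric
termination_by rest.length
decreasing_by
  all_goals
    exact Nat.lt_trans (pvPartition_some_length _ _ _ _ h2) (pvPartition_some_length _ _ _ _ h1)

def read_annotated_sequence_alt (annotated_sequence : String) (symmetric : Bool) : String × (List (String × String)) :=
  let r := pvBLoop annotated_sequence.toList 0 [] PySem.Dict.empty 0 symmetric
  (String.ofList r.1.dropLast, r.2.items)   -- sequence[:-1] = dropLast

-- ===== PRECONDITION & SPEC =====
def Spec_read_annotated_sequence (annotated_sequence : String) (symmetric : Bool) (out : String × (List (String × String))) : Prop := out = read_annotated_sequence_alt annotated_sequence symmetric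
instance (annotated_sequence : String) (symmetric : Bool) (out : String × (List (String × String))) : Decidable (Spec_read_annotated_sequence annotated_sequence symmetric out) := by unfold Spec_read_annotated_sequence; infer_instance

-- ===== CLAIM (what is proved, stated in full; the proofs are below) =====
def Claim_equal_read_annotated_sequence : Prop := ∀ (annotated_sequence : String) (symmetric : Bool), Dom_read_annotated_sequence annotated_sequence symmetric → Spec_read_annotated_sequence annotated_sequence symmetric (read_annotated_sequence annotated_sequence symmetric)

-- ===== LEMMAS AND PROOFS =====

theorem pvPartition_some_eq (c : Char) (l pre post : List Char)
    (h : pvPartition c l = (pre, some post)) : l = pre ++ c :: post ∧ c ∉ pre := by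
  induction l generalizing pre with
  | nil => simp [pvPartition] at h
  | cons x xs ih =>
    by_cases hx : x = c
    · simp only [pvPartition, if_pos hx, Prod.mk.injEq, Option.some.injEq] at h
      subst hx
      simp [← h.1, h.2]
    · rcases hp : pvPartition c xs with ⟨p1, p2⟩
      simp only [pvPartition, if_neg hx, hp, Prod.mk.injEq] at h
      cases p2 with
      | none => simp at h
      | some q =>
        obtain ⟨hpre, hpost⟩ := h
        simp only [Option.some.injEq] at hpost
        subst hpost
        obtain ⟨h1, h2⟩ := ih p1 hp
        subst hpre
        simp [h1, Ne.symm hx, h2]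

theorem pvPartition_none_eq (c : Char) (l pre : List Char)
    (h : pvPartition c l = (pre, none)) : pre = l ∧ c ∉ l := by
  induction l generalizing pre with
  | nil =>
    simp only [pvPartition, Prod.mk.injEq] at h
    simp [← h.1]
  | cons x xs ih =>
    by_cases hx : x = c
    · simp [pvPartition, hx] at h
    · rcases hp : pvPartition c xs with ⟨p1, p2⟩
      simp only [pvPartition, if_neg hx, hp, Prod.mk.injEq] at h
      cases p2 with
      | some q => simp at h
      | none =>
        obtain ⟨hpre, -⟩ := h
        obtain ⟨h1, h2⟩ := ih p1 hp
        subst h1 hpre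
        simp [Ne.symm hx, h2]


-- A's loop over a chunk of ordinary characters (no '['): each is appended to sequence.
theorem pvScanSeq (s : List Char) (sym : Bool) (chunk : List Char) (h : '[' ∉ chunk) :
    ∀ (tail : List Char) (idx : Nat) (seq : List Char) (d : PySem.Dict String String)
      (idiff : Int) (bidx : Nat) (nterm : Int),
    pvALoop s (chunk ++ tail) idx seq d false idiff bidx nterm sym =
      pvALoop s tail (idx + chunk.length) (seq ++ chunk) d false idiff bidx nterm sym := by
  induction chunk with
  | nil => intro tail idx seq d idiff bidx nterm; simp
  | cons c cs ih =>
    intro tail idx seq d idiff bidx nterm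
    have hc : ¬ (c = '[') := by
      intro hcc; exact h (by simp [hcc])
    have hcs : '[' ∉ cs := fun hm => h (by simp [hm])
    simp only [List.cons_append, pvALoop, Bool.false_eq_true, if_false, if_neg hc]
    rw [ih hcs]
    simp [List.append_assoc, Nat.add_comm, Nat.add_left_comm]

-- A's loop inside an annotation (no ']'): only index and index_diff advance.
theorem pvScanAnn (s : List Char) (sym : Bool) (inner : List Char) (h : ']' ∉ inner) :
    ∀ (tail : List Char) (j : Nat) (seq : List Char) (d : PySem.Dict String String)
      (idiff : Int) (bidx : Nat) (nterm : Int),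
    pvALoop s (inner ++ tail) j seq d true idiff bidx nterm sym =
      pvALoop s tail (j + inner.length) seq d true (idiff + inner.length) bidx nterm sym := by
  induction inner with
  | nil => intro tail j seq d idiff bidx nterm; simp
  | cons c cs ih =>
    intro tail j seq d idiff bidx nterm
    have hc : ¬ (c = ']') := by
      intro hcc; exact h (by simp [hcc])
    have hcs : ']' ∉ cs := fun hm => h (by simp [hm])
    simp only [List.cons_append, pvALoop, if_true, if_neg hc]
    rw [ih hcs]
    congr 1
    · simp; omega
    · simp; ring

-- the slice A takes between the brackets is exactly the inner chunk
theorem pvSliceMid (u inner v : List Char) :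
    PySem.List.slice (u ++ inner ++ v) (some ((u.length : Int)))
      (some ((u.length : Int) + (inner.length : Int))) = inner := by
  rw [PySem.List.slice_natCast_add]
  rw [List.append_assoc, List.drop_left, List.take_left]

-- one-step equations for pvBLoop (its three outcomes per iteration)
theorem pvBLoop_eq_none (rest : List Char) (L : Int) (chunks : List Char)
    (d : PySem.Dict String String) (nterm : Int) (sym : Bool) (chunk : List Char)
    (h : pvPartition '[' rest = (chunk, none)) :
    pvBLoop rest L chunks d nterm sym = (chunks ++ chunk, d) := by
  unfold pvBLoop
  split
  · rename_i c' heq; rw [h] at heq; cases heq; rfl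
  · rename_i c' r' heq; rw [h] at heq; cases heq

theorem pvBLoop_eq_noclose (rest : List Char) (L : Int) (chunks : List Char)
    (d : PySem.Dict String String) (nterm : Int) (sym : Bool) (chunk rest2 inner : List Char)
    (h1 : pvPartition '[' rest = (chunk, some rest2))
    (h2 : pvPartition ']' rest2 = (inner, none)) :
    pvBLoop rest L chunks d nterm sym = (chunks ++ chunk, d) := by
  unfold pvBLoop
  split
  · rename_i c' heq; rw [h1] at heq; cases heq
  · rename_i c' r' heq; rw [h1] at heq; cases heq
    split
    · rfl
    · rename_i i' r3 heq2; rw [h2] at heq2; cases heq2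

theorem pvBLoop_eq_step (rest : List Char) (L : Int) (chunks : List Char)
    (d : PySem.Dict String String) (nterm : Int) (sym : Bool) (chunk rest2 inner rest3 : List Char)
    (h1 : pvPartition '[' rest = (chunk, some rest2))
    (h2 : pvPartition ']' rest2 = (inner, some rest3)) :
    pvBLoop rest L chunks d nterm sym =
      (if (sym && PySem.Chars.isIn ":NtermProteinFull".toList inner) = true then
        if (nterm + 1 == 2) = true then (chunks ++ chunk, d)
        else
          pvBLoop rest3 (L + chunk.length) (chunks ++ chunk)
            (d.insert (PySem.Int.toStr (L + chunk.length - 1)) (String.ofList inner))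
            (nterm + 1) sym
      else
        pvBLoop rest3 (L + chunk.length) (chunks ++ chunk)
          (d.insert (PySem.Int.toStr (L + chunk.length - 1)) (String.ofList inner))
          nterm sym) := by
  conv_lhs => rw [pvBLoop]
  split
  · rename_i c' heq; rw [h1] at heq; cases heq
  · rename_i c' r' heq; rw [h1] at heq; cases heq
    split
    · rename_i i' heq2; rw [h2] at heq2; cases heq2
    · rename_i i' r3 heq2; rw [h2] at heq2; cases heq2; rfl

theorem pvMain (sym : Bool) (n : Nat) : ∀ rest : List Char, rest.length ≤ n →
    ∀ (pre seq : List Char) (d : PySem.Dict String String) (idiff : Int) (bidx : Nat) (nterm : Int),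
    (pre.length : Int) - idiff = (seq.length : Int) →
    pvALoop (pre ++ rest) rest pre.length seq d false idiff bidx nterm sym =
      pvBLoop rest (seq.length) seq d nterm sym := by
  induction n with
  | zero =>
    intro rest hlen pre seq d idiff bidx nterm hinv
    have : rest = [] := List.length_eq_zero_iff.mp (Nat.le_zero.mp hlen)
    subst this
    simp [pvALoop, pvBLoop, pvPartition]
  | succ n ih =>
    intro rest hlen pre seq d idiff bidx nterm hinv
    rcases h1 : pvPartition '[' rest with ⟨chunk, o⟩
    cases o with
    | none =>
      obtain ⟨hch, hnot⟩ := pvPartition_none_eq '[' rest chunk h1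
      subst hch
      have hsc := pvScanSeq (pre ++ chunk) sym chunk hnot []
      simp only [List.append_nil] at hsc
      rw [hsc]
      rw [pvBLoop_eq_none _ _ _ _ _ _ _ h1]
      simp [pvALoop]
    | some rest2 =>
      obtain ⟨hch, hnot⟩ := pvPartition_some_eq '[' rest chunk rest2 h1
      subst hch
      rw [pvScanSeq _ sym chunk hnot]
      simp only [pvALoop, Bool.false_eq_true, if_false]
      rcases h2 : pvPartition ']' rest2 with ⟨inner, o2⟩
      cases o2 with
      | none =>
        obtain ⟨hin, hnot2⟩ := pvPartition_none_eq ']' rest2 inner h2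
        subst hin
        have hsa := pvScanAnn (pre ++ (chunk ++ '[' :: inner)) sym inner hnot2 []
        simp only [List.append_nil] at hsa
        rw [hsa]
        rw [pvBLoop_eq_noclose _ _ _ _ _ _ _ _ _ h1 h2]
        simp [pvALoop]
      | some rest3 =>
        obtain ⟨hin, hnot2⟩ := pvPartition_some_eq ']' rest2 inner rest3 h2
        subst hin
        rw [pvScanAnn _ sym inner hnot2]
        simp only [pvALoop, if_true]
        -- the slice is exactly `inner`
        have hs : pre ++ (chunk ++ '[' :: (inner ++ ']' :: rest3)) =
            (pre ++ chunk ++ ['[']) ++ inner ++ (']' :: rest3) := by simp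
        have hslice : PySem.List.slice (pre ++ (chunk ++ '[' :: (inner ++ ']' :: rest3)))
            (some (((pre.length + chunk.length : Nat) : Int) + 1))
            (some (((pre.length + chunk.length + 1 + inner.length : Nat) : Int))) = inner := by
          rw [hs]
          have h1' : (((pre.length + chunk.length : Nat) : Int) + 1) =
              (((pre ++ chunk ++ ['[']).length : Nat) : Int) := by simp; push_cast; ring
          have h2' : (((pre.length + chunk.length + 1 + inner.length : Nat) : Int)) =
              (((pre ++ chunk ++ ['[']).length : Nat) : Int) + (inner.length : Int) := by
            simp; push_cast; ring
          rw [h1', h2', pvSliceMid]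
        rw [hslice]
        have hkey : ((pre.length + chunk.length + 1 + inner.length : Nat) : Int) -
            (idiff + 1 + (inner.length : Int) + 1) = (seq.length : Int) + (chunk.length : Int) - 1 := by
          push_cast; omega
        have hlen3 : rest3.length ≤ n := by
          simp at hlen; omega
        have hrec : ∀ (d' : PySem.Dict String String) (nterm' : Int),
            pvALoop (pre ++ (chunk ++ '[' :: (inner ++ ']' :: rest3))) rest3
              (pre.length + chunk.length + 1 + inner.length + 1) (seq ++ chunk) d' false
              (idiff + 1 + (inner.length : Int) + 1) (pre.length + chunk.length) nterm' sym =
            pvBLoop rest3 ((seq.length : Int) + (chunk.length : Int)) (seq ++ chunk) d' nterm' sym := by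
          intro d' nterm'
          have hpre : pre ++ (chunk ++ '[' :: (inner ++ ']' :: rest3)) =
              (pre ++ chunk ++ '[' :: inner ++ [']']) ++ rest3 := by simp
          have hplen : (pre ++ chunk ++ '[' :: inner ++ [']']).length =
              pre.length + chunk.length + 1 + inner.length + 1 := by simp; omega
          have := ih rest3 hlen3 (pre ++ chunk ++ '[' :: inner ++ [']']) (seq ++ chunk) d'
            (idiff + 1 + (inner.length : Int) + 1) (pre.length + chunk.length) nterm'
            (by rw [hplen]; push_cast [List.length_append] at hinv ⊢; omega)
          rw [hplen] at this
          rw [hpre, this]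
          congr 1
          push_cast [List.length_append]; ring
        rw [pvBLoop_eq_step _ _ _ _ _ _ _ _ _ _ h1 h2]
        by_cases hcond : (sym && PySem.Chars.isIn ":NtermProteinFull".toList inner) = true
        · rw [if_pos hcond, if_pos hcond]
          by_cases hnt : (nterm + 1 == 2) = true
          · rw [if_pos hnt, if_pos hnt]
          · rw [if_neg hnt, if_neg hnt]
            rw [hkey, hrec]
        · rw [if_neg hcond, if_neg hcond]
          rw [hkey, hrec]

theorem read_annotated_sequence_spec : Claim_equal_read_annotated_sequence := by
  intro s sym _
  unfold Spec_read_annotated_sequence read_annotated_sequence read_annotated_sequence_alt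
  have h := pvMain sym s.toList.length s.toList (le_refl _) [] [] PySem.Dict.empty 0 0 0 (by simp)
  simpa using congrArg (fun r : List Char × PySem.Dict String String => (String.ofList r.1.dropLast, r.2.items)) h
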